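-- pv_equiv track=rewrite | github.com/BaptisteMERESSE/Projet-de-programmation-2A-ENSAE | modules/auxiliary_functions.py | remove_zero_start
-- ===== SOURCE A (Python) =====
-- def remove_zero_start(code):
--     #enlève tous les "0" dans une chaine de caractère qui apparaissent avant un autre chiffre.
--     #Par exemple: "ABC001234" renvoie "ABC1234"
--     i = True
--     new_str = ""
--     chiffres = [str(j) for j in range(1, 10)]
--     for a in code:
--         if a in chiffres:
--             i = False
--         if not(a == "0" and i):
--             new_str += a
--     return new_str
-- ===== SOURCE B (Python) =====
-- def remove_zero_start(code):
--     for idx, a in enumerate(code):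
--         if a in "123456789":
--             return code[:idx].replace("0", "") + code[idx:]
--     return code.replace("0", "")
-- ===== Notes on version B (the rewrite author's own statement) =====
-- stated objective: simpler
-- what changed: Replaces the flag-driven char-by-char accumulation with a search for the first nonzero digit followed by one bulk replace on the prefix and a slice concatenation.
import Mathlib
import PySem

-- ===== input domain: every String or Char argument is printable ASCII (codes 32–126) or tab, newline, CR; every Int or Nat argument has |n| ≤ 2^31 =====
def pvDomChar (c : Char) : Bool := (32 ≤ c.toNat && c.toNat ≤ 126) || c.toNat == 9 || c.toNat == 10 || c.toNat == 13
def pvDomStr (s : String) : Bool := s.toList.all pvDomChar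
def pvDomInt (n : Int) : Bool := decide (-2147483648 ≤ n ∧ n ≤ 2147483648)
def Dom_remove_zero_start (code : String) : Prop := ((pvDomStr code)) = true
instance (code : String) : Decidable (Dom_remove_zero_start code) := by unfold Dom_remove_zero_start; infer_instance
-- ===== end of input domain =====

-- B replaces A's flag-driven char-by-char accumulation with a split-point search
-- (index of the first nonzero digit) plus a bulk zero-removal on the prefix; objective: simpler.


-- ===== PORT A =====
-- chiffres = [str(j) for j in range(1, 10)] (each a one-char string; the loop char is one char too)
def pvChiffres : List Char := ['1', '2', '3', '4', '5', '6', '7', '8', '9']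

-- one loop iteration over state (i, new_str): flag update, then the guarded append
def pvAStep (st : Bool × List Char) (a : Char) : Bool × List Char :=
  let i := if a ∈ pvChiffres then false else st.1
  (i, if a = '0' ∧ i then st.2 else st.2 ++ [a])

def remove_zero_start (code : String) : String :=
  String.mk (code.toList.foldl pvAStep (true, [])).2

-- ===== PORT B =====
-- enumerate loop: index of the first character in "123456789", none if absent
def pvFindNZ : List Char → Option Nat
  | [] => none
  | a :: rest => if a ∈ pvChiffres then some 0 else (pvFindNZ rest).map (· + 1)

-- .replace("0", "") on a string is exactly dropping every '0' character
def pvDropZeros (cs : List Char) : List Char := cs.filter (fun c => c ≠ '0')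

def remove_zero_start_alt (code : String) : String :=
  let cs := code.toList
  match pvFindNZ cs with
  | some idx => String.mk (pvDropZeros (cs.take idx) ++ cs.drop idx)
  | none => String.mk (pvDropZeros cs)

-- ===== PRECONDITION & SPEC =====
def Spec_remove_zero_start (code : String) (out : String) : Prop := out = remove_zero_start_alt code
instance (code : String) (out : String) : Decidable (Spec_remove_zero_start code out) := by unfold Spec_remove_zero_start; infer_instance

-- ===== CLAIM (what is proved, stated in full; the proofs are below) =====
def Claim_equal_remove_zero_start : Prop := ∀ (code : String), Dom_remove_zero_start code → Spec_remove_zero_start code (remove_zero_start code)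

-- ===== LEMMAS AND PROOFS =====

-- B's result as a list function
def pvBres (cs : List Char) : List Char :=
  match pvFindNZ cs with
  | some idx => pvDropZeros (cs.take idx) ++ cs.drop idx
  | none => pvDropZeros cs

lemma foldl_false (cs : List Char) : ∀ acc, cs.foldl pvAStep (false, acc) = (false, acc ++ cs) := by
  induction cs with
  | nil => intro acc; simp
  | cons a rest ih =>
    intro acc
    simp only [List.foldl_cons, pvAStep]
    have : (if a ∈ pvChiffres then false else false) = false := by split <;> rfl
    simp only [this]
    have hne : ¬(a = '0' ∧ false = true) := by simp
    rw [if_neg (by simp)]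
    rw [ih]
    simp

lemma pvBres_cons (a : Char) (rest : List Char) :
    pvBres (a :: rest) =
      if a ∈ pvChiffres then a :: rest
      else if a = '0' then pvBres rest else a :: pvBres rest := by
  by_cases h : a ∈ pvChiffres
  · simp [pvBres, pvFindNZ, pvDropZeros, h]
  · have h0 : a ∉ pvChiffres := h
    simp only [pvBres, pvFindNZ, h0, if_false]
    cases hf : pvFindNZ rest with
    | none =>
      by_cases hz : a = '0' <;> simp [pvDropZeros, hz]
    | some idx =>
      by_cases hz : a = '0' <;> simp [pvDropZeros, hz]

lemma foldl_true (cs : List Char) : ∀ acc, (cs.foldl pvAStep (true, acc)).2 = acc ++ pvBres cs := by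
  induction cs with
  | nil => intro acc; simp [pvBres, pvFindNZ, pvDropZeros]
  | cons a rest ih =>
    intro acc
    rw [pvBres_cons]
    simp only [List.foldl_cons, pvAStep]
    by_cases h : a ∈ pvChiffres
    · simp only [if_pos h]
      have hz : ¬(a = '0' ∧ false = true) := by simp
      rw [if_neg (by simpa using hz)]
      rw [foldl_false]
      simp [h]
    · simp only [if_neg h, h, if_false]
      by_cases hz : a = '0'
      · rw [if_pos (by simp [hz]), ih]
        simp [hz]
      · rw [if_neg (by simp [hz]), ih]
        simp [hz]

-- ===== VERDICT (by name: the statement is the Claim_ definition above) =====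
theorem remove_zero_start_spec : Claim_equal_remove_zero_start := by
  intro code _
  show _ = _
  simp only [remove_zero_start, remove_zero_start_alt]
  rw [foldl_true]
  simp only [List.nil_append, pvBres]
  cases hf : pvFindNZ code.toList <;> rfl
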